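-- pv_equiv track=rewrite | github.com/koushikkatakam/library | lc_programs/codes.py | lc_2011
-- ===== SOURCE A (Python) =====
-- def lc_2011(operations):
--       """
--       Calculates the final value after performing a sequence of operations.
--
--       Iterates through each operation in the list and updates the value based on
--       the operation type ("--X" or "X++"). For each "--X" or "X--" operation, decrements
--       the value by 1; for each "++X" or "X++" operation, increments the value by 1.
--       Finally, returns the computed final value.
--
--       Parameters:
--           operations (List[str]): The list of operations to perform.
--
--       Returns:
--           int: The final value after performing the operations.
--
--       Example:
--           Input: operations = ["--X","X++","X++"]
--           Output: 1
--       """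
--       value = 0
--       for operation in operations:
--           if operation == "--X" or operation == "X--":
--               value -= 1
--           else:
--               value += 1
--       return value
-- ===== SOURCE B (Python) =====
-- def lc_2011(operations):
--     # Frequency-table approach: build a histogram of operation tokens once,
--     # then aggregate over the distinct tokens, weighting each by its count.
--     freq = {}
--     for op in operations:
--         freq[op] = freq.get(op, 0) + 1
--     total = 0
--     for op, cnt in freq.items():
--         total += -cnt if op in ("--X", "X--") else cnt
--     return total
-- ===== Notes on version B (the rewrite author's own statement) =====
-- stated objective: alternative
-- what changed: B builds a dict histogram of the operation tokens in one pass, then aggregates over the distinct tokens, adding or subtracting each token's count according to its sign, instead of A's per-element running +/-1 accumulator.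
import Mathlib
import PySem

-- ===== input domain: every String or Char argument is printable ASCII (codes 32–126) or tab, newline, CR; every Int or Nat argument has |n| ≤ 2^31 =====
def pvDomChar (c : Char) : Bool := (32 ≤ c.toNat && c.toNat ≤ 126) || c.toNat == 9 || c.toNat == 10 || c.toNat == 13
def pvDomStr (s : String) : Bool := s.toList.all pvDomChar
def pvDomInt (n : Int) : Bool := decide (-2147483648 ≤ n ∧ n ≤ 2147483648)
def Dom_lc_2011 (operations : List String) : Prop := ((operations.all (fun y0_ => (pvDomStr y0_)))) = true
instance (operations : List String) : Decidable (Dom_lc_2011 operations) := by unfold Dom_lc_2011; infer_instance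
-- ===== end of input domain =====

-- B replaces A's per-element running ±1 accumulator with a dict histogram built once,
-- then aggregated over the distinct tokens (count-weighted signs): alternative algorithm.

-- ===== PORT A =====
def lc_2011 (operations : List String) : Int :=
  operations.foldl (fun value operation =>
    if operation = "--X" ∨ operation = "X--" then value - 1 else value + 1) 0

-- ===== PORT B =====
def lc_2011_alt (operations : List String) : Int :=
  let freq : PySem.Dict String Int :=
    operations.foldl (fun d op => d.insert op (d.getD op 0 + 1)) PySem.Dict.empty
  freq.items.foldl (fun total p =>
    total + (if p.1 = "--X" ∨ p.1 = "X--" then -p.2 else p.2)) 0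

-- ===== PRECONDITION & SPEC =====
def Spec_lc_2011 (operations : List String) (out : Int) : Prop := out = lc_2011_alt operations
instance (operations : List String) (out : Int) : Decidable (Spec_lc_2011 operations out) := by unfold Spec_lc_2011; infer_instance

-- ===== CLAIM (what is proved, stated in full; the proofs are below) =====
def Claim_equal_lc_2011 : Prop := ∀ (operations : List String), Dom_lc_2011 operations → Spec_lc_2011 operations (lc_2011 operations)

-- ===== LEMMAS AND PROOFS =====

-- the decrement predicate, as a Bool
def pvDec (op : String) : Bool := decide (op = "--X" ∨ op = "X--")

-- A's loop computes (#non-decrement) − (#decrement).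
theorem lc_2011_A_closed (operations : List String) (v : Int) :
    operations.foldl (fun value operation =>
      if operation = "--X" ∨ operation = "X--" then value - 1 else value + 1) v
    = v + (operations.countP (fun op => !pvDec op) : Int)
        - (operations.countP pvDec : Int) := by
  induction operations generalizing v with
  | nil => simp
  | cons h t ih =>
    simp only [List.foldl_cons, List.countP_cons, ih]
    by_cases hd : h = "--X" ∨ h = "X--" <;>
      simp [pvDec, hd] <;> ring

-- a fold accumulating additions is a sum of a map
theorem foldl_add_eq_sum {α : Type} (m : List α) (g : α → Int) (v : Int) :
    m.foldl (fun t x => t + g x) v = v + (m.map g).sum := by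
  induction m generalizing v with
  | nil => simp
  | cons a t ih => simp [ih]; ring

-- signed sum over a list splits into the two filtered sums
theorem sum_signed_split (m : List String) (f : String → Int) :
    (m.map (fun k => if pvDec k then -(f k) else f k)).sum
    = ((m.filter (fun k => !pvDec k)).map f).sum - ((m.filter pvDec).map f).sum := by
  induction m with
  | nil => simp
  | cons a t ih =>
    by_cases ha : pvDec a <;> simp [ha, ih] <;> ring

-- a filtered Int-cast count sum is countP (via Mathlib's dedup lemma and a permutation)
theorem sum_counts_filter (l K : List String) (hnd : K.Nodup)
    (hmem : ∀ x, x ∈ K ↔ x ∈ l) (p : String → Bool) :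
    ((K.filter p).map (fun k => (l.count k : Int))).sum = (l.countP p : Int) := by
  have hperm : List.Perm K l.dedup :=
    (List.perm_ext_iff_of_nodup hnd l.nodup_dedup).2 (by
      intro a; rw [hmem a, List.mem_dedup])
  have hperm2 : List.Perm ((K.filter p).map (fun k => (l.count k : Int)))
      ((l.dedup.filter p).map (fun k => (l.count k : Int))) :=
    (hperm.filter p).map _
  rw [hperm2.sum_eq]
  have hnat : ((l.dedup.filter p).map (fun k => l.count k)).sum = l.countP p :=
    List.sum_map_count_dedup_filter_eq_countP p l
  calc ((l.dedup.filter p).map (fun k => (l.count k : Int))).sum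
      = (((l.dedup.filter p).map (fun k => l.count k)).sum : Int) := by
        rw [Nat.cast_list_sum, List.map_map]; rfl
    _ = (l.countP p : Int) := by rw [hnat]

-- ===== VERDICT (by name: the statement is the Claim_ definition above) =====
theorem lc_2011_spec : Claim_equal_lc_2011 := by
  intro operations _
  unfold Spec_lc_2011 lc_2011 lc_2011_alt
  show _ = (PySem.Dict.counter operations).items.foldl
    (fun total p => total + (if p.1 = "--X" ∨ p.1 = "X--" then -p.2 else p.2)) 0
  rw [PySem.Dict.items_counter, lc_2011_A_closed, foldl_add_eq_sum, List.map_map]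
  have hcomp : ((fun p : String × Int =>
        if p.1 = "--X" ∨ p.1 = "X--" then -p.2 else p.2) ∘
        (fun k => (k, (operations.count k : Int))))
      = fun k => if pvDec k then -((operations.count k : Int))
                 else (operations.count k : Int) := by
    funext k
    by_cases hk : k = "--X" ∨ k = "X--" <;>
      simp [Function.comp, hk, pvDec]
  rw [hcomp, sum_signed_split,
      sum_counts_filter operations (PySem.Set.ofList operations)
        (PySem.Set.nodup_ofList operations)
        (fun x => PySem.Set.mem_ofList operations x) pvDec,
      sum_counts_filter operations (PySem.Set.ofList operations)
        (PySem.Set.nodup_ofList operations)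
        (fun x => PySem.Set.mem_ofList operations x) (fun k => !pvDec k)]
  ring
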